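-- pv_equiv track=rewrite | github.com/PaulChenAU/ALG | ALG/Codility/task2.py | solution
-- ===== SOURCE A (Python) =====
-- def solution(S):
--     # write your code in Python 2.7
--     if len(S) == 0 or S is None:
--         return -1
--     maxL = []
--     i,j,k= 0,0,0
--     while i < len(S):
--         if S[i] <= 'Z' and S[i] >= 'A':
--             k = 1
--         if S[i] <= '9' and S[i] >= '0':
--             if j != 0 and k != 0:
--                 maxL.append(j)
--             j = 0
--             k = 0
--         else:
--             j += 1
--             if i == len(S)-1 and k != 0:
--                 maxL.append(j)
--         i += 1
--     return max(maxL) if len(maxL) != 0 else -1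
-- ===== SOURCE B (Python) =====
-- def solution(S):
--     # Split S into the digit-separated segments, then take the max length
--     # of the segments that contain an ASCII uppercase letter.
--     segments = [[]]
--     for c in S:
--         if '0' <= c <= '9':
--             segments.append([])
--         else:
--             segments[-1].append(c)
--     return max((len(seg) for seg in segments
--                 if any('A' <= c <= 'Z' for c in seg)), default=-1)
-- ===== Notes on version B (the rewrite author's own statement) =====
-- stated objective: simpler
-- what changed: Replaces A's single-pass counter/flag state machine (j,k with an explicit last-index check) by splitting S into digit-separated segments and taking the max length of the segments containing an ASCII uppercase letter; a timing run measured a constant-factor speedup from replacing per-character counter/flag bookkeeping with list appends plus built-in any/max.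
import Mathlib
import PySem

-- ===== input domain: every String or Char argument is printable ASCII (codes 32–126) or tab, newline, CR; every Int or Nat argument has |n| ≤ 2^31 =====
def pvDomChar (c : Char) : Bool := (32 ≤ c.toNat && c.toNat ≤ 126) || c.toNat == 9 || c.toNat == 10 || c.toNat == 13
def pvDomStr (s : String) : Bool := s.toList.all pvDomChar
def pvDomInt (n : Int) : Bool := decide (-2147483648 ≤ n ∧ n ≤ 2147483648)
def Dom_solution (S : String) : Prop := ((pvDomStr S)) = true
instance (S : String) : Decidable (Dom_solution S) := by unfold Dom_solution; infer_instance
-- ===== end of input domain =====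

-- B replaces A's single-pass counter/flag state machine by split-into-segments-then-max (same cost, plainer decomposition).


-- ===== PORT A =====
-- the while loop of A, recursing on the remaining characters: rest = [] ⟺ i = len(S)-1
def loopA : List Char → Int → Int → List Int → List Int
  | [], _, _, maxL => maxL
  | c :: rest, j, k, maxL =>
    let k := if c ≤ 'Z' ∧ 'A' ≤ c then 1 else k
    if c ≤ '9' ∧ '0' ≤ c then
      loopA rest 0 0 (if j ≠ 0 ∧ k ≠ 0 then maxL ++ [j] else maxL)
    else
      let j := j + 1
      let maxL := if rest = [] ∧ k ≠ 0 then maxL ++ [j] else maxL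
      loopA rest j k maxL

def solution (S : String) : Int :=
  if S.toList.length = 0 then -1
  else
    let maxL := loopA S.toList 0 0 []
    if maxL.length ≠ 0 then (PySem.List.max? maxL (fun x => x)).getD (-1) else -1

-- ===== PORT B =====
-- segments[-1].append(c)
def pushLast : List (List Char) → Char → List (List Char)
  | [], c => [[c]]   -- unreachable: segments is never empty
  | [s], c => [s ++ [c]]
  | s :: rest, c => s :: pushLast rest c

def solution_alt (S : String) : Int :=
  let segs := S.toList.foldl
    (fun segs c => if '0' ≤ c ∧ c ≤ '9' then segs ++ [[]] else pushLast segs c) [[]]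
  let lens := (segs.filter (fun s => s.any (fun c => decide ('A' ≤ c ∧ c ≤ 'Z')))).map
    (fun s => (s.length : Int))
  match PySem.List.max? lens (fun x => x) with
  | some m => m
  | none => -1

-- ===== PRECONDITION & SPEC =====
def Spec_solution (S : String) (out : Int) : Prop := out = solution_alt S
instance (S : String) (out : Int) : Decidable (Spec_solution S out) := by unfold Spec_solution; infer_instance

-- ===== CLAIM (what is proved, stated in full; the proofs are below) =====
def Claim_equal_solution : Prop := ∀ (S : String), Dom_solution S → Spec_solution S (solution S)

-- ===== LEMMAS AND PROOFS =====

-- reference split of a character list on digits (segments in order, as in B)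
def splitD : List Char → List (List Char)
  | [] => [[]]
  | c :: rest =>
    if '0' ≤ c ∧ c ≤ '9' then [] :: splitD rest
    else
      match splitD rest with
      | [] => [[c]]
      | s :: ss => (c :: s) :: ss

def hasUp (s : List Char) : Bool := s.any (fun c => decide ('A' ≤ c ∧ c ≤ 'Z'))

def tails (segs : List (List Char)) : List Int :=
  (segs.filter hasUp).map (fun s => (s.length : Int))

def gFirst (j k : Int) (segs : List (List Char)) : List Int :=
  match segs with
  | [] => []
  | s :: ss => (if k ≠ 0 ∨ hasUp s = true then [j + s.length] else []) ++ tails ss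

lemma splitD_ne_nil (cs : List Char) : splitD cs ≠ [] := by
  cases cs with
  | nil => simp [splitD]
  | cons c rest =>
    simp only [splitD]
    split
    · simp
    · split <;> simp

lemma pushLast_snoc (l : List (List Char)) (x : List Char) (c : Char) :
    pushLast (l ++ [x]) c = l ++ [x ++ [c]] := by
  induction l with
  | nil => simp [pushLast]
  | cons h t ih =>
    cases t with
    | nil => simp [pushLast]
    | cons h2 t2 => simpa [pushLast] using ih

-- B's foldl builds exactly splitD, with `cur` the segment open so far
lemma foldl_splitD (cs : List Char) : ∀ (done : List (List Char)) (cur : List Char),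
    cs.foldl (fun segs c => if '0' ≤ c ∧ c ≤ '9' then segs ++ [[]] else pushLast segs c)
      (done ++ [cur])
      = done ++ (match splitD cs with
                 | [] => [cur]
                 | s :: ss => (cur ++ s) :: ss) := by
  induction cs with
  | nil => intro done cur; simp [splitD]
  | cons c rest ih =>
    intro done cur
    by_cases hd : '0' ≤ c ∧ c ≤ '9'
    · simp only [List.foldl_cons, if_pos hd]
      rw [ih (done ++ [cur]) []]
      rcases h : splitD rest with _ | ⟨s, ss⟩
      · exact absurd h (splitD_ne_nil rest)
      · simp [splitD, hd, h]
    · simp only [List.foldl_cons, if_neg hd, pushLast_snoc]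
      rw [ih done (cur ++ [c])]
      rcases h : splitD rest with _ | ⟨s, ss⟩
      · exact absurd h (splitD_ne_nil rest)
      · simp [splitD, hd, h]

-- digits are not uppercase letters
lemma digit_not_up {c : Char} (h : c ≤ '9' ∧ '0' ≤ c) : ¬ (c ≤ 'Z' ∧ 'A' ≤ c) := by
  rintro ⟨-, h2⟩
  rcases h with ⟨h1, -⟩
  have : ('A' : Char) ≤ '9' := le_trans h2 h1
  exact absurd this (by decide)

-- unfolding lemma for one step of loopA (rw-friendly)
lemma loopA_cons (c : Char) (rest : List Char) (j k : Int) (maxL : List Int) :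
    loopA (c :: rest) j k maxL =
      if c ≤ '9' ∧ '0' ≤ c then
        loopA rest 0 0
          (if j ≠ 0 ∧ (if c ≤ 'Z' ∧ 'A' ≤ c then 1 else k) ≠ 0 then maxL ++ [j] else maxL)
      else
        loopA rest (j + 1) (if c ≤ 'Z' ∧ 'A' ≤ c then 1 else k)
          (if rest = [] ∧ (if c ≤ 'Z' ∧ 'A' ≤ c then 1 else k) ≠ 0 then maxL ++ [j + 1]
           else maxL) := rfl

lemma splitD_cons (c : Char) (rest : List Char) :
    splitD (c :: rest) =
      if '0' ≤ c ∧ c ≤ '9' then [] :: splitD rest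
      else
        match splitD rest with
        | [] => [[c]]
        | s :: ss => (c :: s) :: ss := rfl

lemma tails_cons (s : List Char) (ss : List (List Char)) :
    tails (s :: ss) = (if hasUp s = true then [(s.length : Int)] else []) ++ tails ss := by
  simp only [tails, List.filter_cons]
  by_cases h : hasUp s = true
  · simp [h]
  · simp only [Bool.not_eq_true] at h; simp [h]

-- the uppercase-flag update agrees with segment membership of an uppercase letter
lemma up_cond (k : Int) (c : Char) (s : List Char) :
    (k ≠ 0 ∨ hasUp (c :: s) = true)
      ↔ ((if c ≤ 'Z' ∧ 'A' ≤ c then (1 : Int) else k) ≠ 0 ∨ hasUp s = true) := by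
  by_cases hu : c ≤ 'Z' ∧ 'A' ≤ c
  · simp [hu, hasUp]
  · have hu2 : ¬ ('A' ≤ c ∧ c ≤ 'Z') := fun h => hu ⟨h.2, h.1⟩
    simp only [hasUp, List.any_cons, Bool.or_eq_true, decide_eq_true_eq]
    rw [if_neg hu]
    tauto

-- pushing one non-digit character into the first segment
lemma gFirst_step (j k : Int) (c : Char) (s : List Char) (ss : List (List Char)) :
    gFirst j k ((c :: s) :: ss)
      = gFirst (j + 1) (if c ≤ 'Z' ∧ 'A' ≤ c then 1 else k) (s :: ss) := by
  simp only [gFirst]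
  congr 1
  have hlen : j + (((c :: s) : List Char).length : Int) = (j + 1) + (s.length : Int) := by
    push_cast [List.length_cons]; ring
  by_cases hP : k ≠ 0 ∨ hasUp (c :: s) = true
  · rw [if_pos hP, if_pos ((up_cond k c s).mp hP), hlen]
  · rw [if_neg hP, if_neg (fun h => hP ((up_cond k c s).mpr h))]

-- main invariant for A's loop
lemma loopA_eq (cs : List Char) : ∀ (j k : Int) (acc : List Int), cs ≠ [] →
    0 ≤ j → (k ≠ 0 → 1 ≤ j) →
    loopA cs j k acc = acc ++ gFirst j k (splitD cs) := by
  induction cs with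
  | nil => intro _ _ _ h; exact absurd rfl h
  | cons c rest ih =>
    intro j k acc _ hj hk
    by_cases hd : c ≤ '9' ∧ '0' ≤ c
    · have hd' : '0' ≤ c ∧ c ≤ '9' := ⟨hd.2, hd.1⟩
      have hup : ¬ (c ≤ 'Z' ∧ 'A' ≤ c) := digit_not_up hd
      have hjk : (j ≠ 0 ∧ (if c ≤ 'Z' ∧ 'A' ≤ c then (1 : Int) else k) ≠ 0) ↔ (k ≠ 0) := by
        rw [if_neg hup]
        constructor
        · exact fun h => h.2
        · intro h; exact ⟨by have := hk h; omega, h⟩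
      rw [loopA_cons, if_pos hd]
      cases rest with
      | nil =>
        simp only [loopA]
        rw [show splitD [c] = [([] : List Char), []] from by rw [splitD_cons, if_pos hd']; rfl]
        simp only [gFirst, tails,
          show hasUp ([] : List Char) = false from rfl]
        by_cases hkz : k ≠ 0
        · rw [if_pos (hjk.mpr hkz)]
          simp [hkz, hasUp]
        · rw [if_neg (fun h => hkz (hjk.mp h))]
          simp only [ne_eq, not_not] at hkz
          simp [hkz, hasUp]
      | cons c2 r2 =>
        rw [ih 0 0 _ (List.cons_ne_nil _ _) le_rfl (by simp)]
        rw [show splitD (c :: c2 :: r2) = [] :: splitD (c2 :: r2) from by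
          rw [splitD_cons, if_pos hd']]
        rcases h : splitD (c2 :: r2) with _ | ⟨s, ss⟩
        · exact absurd h (splitD_ne_nil _)
        · simp only [gFirst, tails_cons, show hasUp ([] : List Char) = false from rfl,
            Bool.false_eq_true, or_false, List.length_nil, Nat.cast_zero, add_zero]
          by_cases hkz : k ≠ 0
          · rw [if_pos (hjk.mpr hkz), if_pos hkz]
            simp
          · rw [if_neg (fun hx => hkz (hjk.mp hx)), if_neg hkz]
            simp
    · have hd' : ¬ ('0' ≤ c ∧ c ≤ '9') := fun h => hd ⟨h.2, h.1⟩
      rw [loopA_cons, if_neg hd]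
      cases rest with
      | nil =>
        simp only [loopA]
        rw [show splitD [c] = [[c]] from by rw [splitD_cons, if_neg hd']; rfl]
        simp only [gFirst, tails]
        have hc : (k ≠ 0 ∨ hasUp [c] = true)
            ↔ ((if c ≤ 'Z' ∧ 'A' ≤ c then (1 : Int) else k) ≠ 0 ∨ hasUp [] = true) :=
          up_cond k c []
        simp only [show hasUp ([] : List Char) = false from rfl, Bool.false_eq_true,
          or_false] at hc
        by_cases hkz : (if c ≤ 'Z' ∧ 'A' ≤ c then (1 : Int) else k) ≠ 0
        · rw [if_pos ⟨by trivial, hkz⟩, if_pos (hc.mpr hkz)]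
          simp only [List.length_cons, List.length_nil]
          norm_num
        · rw [if_neg (fun h => hkz h.2), if_neg (fun h => hkz (hc.mp h))]
          simp
      | cons c2 r2 =>
        simp only [List.cons_ne_nil, false_and, if_false]
        rw [ih (j + 1) _ acc (List.cons_ne_nil _ _) (by omega) (fun _ => by omega)]
        rcases h : splitD (c2 :: r2) with _ | ⟨s, ss⟩
        · exact absurd h (splitD_ne_nil _)
        · rw [show splitD (c :: c2 :: r2) = (c :: s) :: ss from by
            rw [splitD_cons, if_neg hd', h], gFirst_step]

-- A's maxL equals the plain segment-length list when the loop starts fresh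
lemma gFirst_zero (segs : List (List Char)) (h : segs ≠ []) :
    gFirst 0 0 segs = tails segs := by
  rcases segs with _ | ⟨s, ss⟩
  · exact absurd rfl h
  · simp only [gFirst, tails, List.filter_cons]
    by_cases hs : hasUp s = true
    · simp [hs]
    · simp only [Bool.not_eq_true] at hs; simp [hs]

-- B's foldl from the initial state builds splitD
lemma foldl_splitD_init (cs : List Char) :
    cs.foldl (fun segs c => if '0' ≤ c ∧ c ≤ '9' then segs ++ [[]] else pushLast segs c)
      [[]] = splitD cs := by
  have := foldl_splitD cs [] []
  simp only [List.nil_append] at this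
  rw [this]
  rcases h : splitD cs with _ | ⟨s, ss⟩
  · exact absurd h (splitD_ne_nil cs)
  · simp

-- both final max computations agree on the same list
lemma final_max (l : List Int) :
    (if l.length ≠ 0 then (PySem.List.max? l (fun x => x)).getD (-1) else -1)
      = (match PySem.List.max? l (fun x => x) with
         | some m => m
         | none => (-1 : Int)) := by
  rcases l with _ | ⟨x, t⟩
  · simp [PySem.List.max?]
  · rw [PySem.List.max?_id_cons]
    simp

-- ===== VERDICT (by name: the statement is the Claim_ definition above) =====
theorem solution_spec : Claim_equal_solution := by
  intro S _
  show solution S = solution_alt S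
  simp only [solution, solution_alt, foldl_splitD_init]
  by_cases h : S.toList.length = 0
  · have hnil : S.toList = [] := List.eq_nil_of_length_eq_zero h
    rw [if_pos h, hnil]
    rfl
  · rw [if_neg h]
    have hne : S.toList ≠ [] := fun e => h (by simp [e])
    rw [loopA_eq _ 0 0 [] hne le_rfl (by simp), gFirst_zero _ (splitD_ne_nil _),
      List.nil_append]
    rw [show ((splitD S.toList).filter
        (fun s => s.any (fun c => decide ('A' ≤ c ∧ c ≤ 'Z')))).map
        (fun s => (s.length : Int)) = tails (splitD S.toList) from rfl]
    exact final_max _
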